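-- pv_equiv track=rewrite | github.com/JP-Regazzi/AlgoritmosProgramacao | Exercicios/Exer7.py | elementos_iguais
-- ===== SOURCE A (Python) =====
-- def elementos_iguais(a, b):
--     if a == [] or b == []:
--         return False
--     elif a[0] == b[0]:
--         return True
--     else:
--         a.pop(0)
--         b.pop(0)
--         return elementos_iguais(a, b)
-- ===== SOURCE B (Python) =====
-- def elementos_iguais(a, b):
--     return any(x == y for x, y in zip(a, b))
-- ===== Notes on version B (the rewrite author's own statement) =====
-- stated objective: idiomatic
-- what changed: Replaces the destructive pop-based recursion with a single non-mutating any-over-zip expression; note B does not mutate the argument lists while A empties them (return value only is proved equivalent).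
import Mathlib
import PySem

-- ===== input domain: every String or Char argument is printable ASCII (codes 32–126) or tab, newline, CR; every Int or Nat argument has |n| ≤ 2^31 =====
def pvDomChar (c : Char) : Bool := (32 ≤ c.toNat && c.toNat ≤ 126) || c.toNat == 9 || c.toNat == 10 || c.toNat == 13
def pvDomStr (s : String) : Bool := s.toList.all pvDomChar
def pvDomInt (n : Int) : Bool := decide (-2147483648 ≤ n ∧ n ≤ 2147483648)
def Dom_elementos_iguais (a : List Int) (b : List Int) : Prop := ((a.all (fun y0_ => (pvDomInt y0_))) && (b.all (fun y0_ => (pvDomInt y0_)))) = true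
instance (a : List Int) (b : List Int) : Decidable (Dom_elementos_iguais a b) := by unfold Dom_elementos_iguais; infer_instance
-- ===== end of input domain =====

-- B replaces A's destructive pop-based recursion by a single any-over-zip pass; A empties
-- its argument lists in Python while B does not mutate them — the equivalence proved here
-- is about the RETURN value only.

-- ===== PORT A =====
-- Literal port of A: empty check, head comparison, pop(0) on both (= recurse on tails).
def elementos_iguais (a : List Int) (b : List Int) : Bool :=
  if a = [] ∨ b = [] then false
  else if a.head! == b.head! then true
  else elementos_iguais a.tail b.tail
termination_by a.length
decreasing_by
  rename_i h _
  cases a with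
  | nil => exact absurd (Or.inl rfl) h
  | cons x xs => simp

-- ===== PORT B =====
def elementos_iguais_alt (a : List Int) (b : List Int) : Bool :=
  (a.zip b).any (fun p => p.1 == p.2)

-- ===== PRECONDITION & SPEC =====
def Spec_elementos_iguais (a : List Int) (b : List Int) (out : Bool) : Prop := out = elementos_iguais_alt a b
instance (a : List Int) (b : List Int) (out : Bool) : Decidable (Spec_elementos_iguais a b out) := by unfold Spec_elementos_iguais; infer_instance

-- ===== CLAIM (what is proved, stated in full; the proofs are below) =====
def Claim_equal_elementos_iguais : Prop := ∀ (a : List Int) (b : List Int), Dom_elementos_iguais a b → Spec_elementos_iguais a b (elementos_iguais a b)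

-- ===== LEMMAS AND PROOFS =====
theorem elementos_iguais_eq (a b : List Int) :
    elementos_iguais a b = elementos_iguais_alt a b := by
  induction a generalizing b with
  | nil => simp [elementos_iguais, elementos_iguais_alt]
  | cons x xs ih =>
    cases b with
    | nil => simp [elementos_iguais, elementos_iguais_alt]
    | cons y ys =>
      rw [elementos_iguais]
      by_cases h : x = y
      · simp [elementos_iguais_alt, h]
      · simp only [elementos_iguais_alt, List.zip_cons_cons, List.any_cons]
        simp [h, ih ys, elementos_iguais_alt]

-- ===== VERDICT (by name: the statement is the Claim_ definition above) =====
theorem elementos_iguais_spec : Claim_equal_elementos_iguais := by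
  intro a b _
  exact elementos_iguais_eq a b
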